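-- pv_equiv track=rewrite | github.com/continuous-symmetry-measure/csm | PythonCSM/permutations/permuters.py | _all_perms_from_cycle_struct
-- ===== SOURCE A (Python) =====
-- import itertools
--
-- def _calc_all_circle_permutations(size):
--     """ Returns the permutation of the cycle """
--     # To compute a full cycle of length n, we take a permutation p of size n-1 and
--     # create the cycle like so: 0 goes to p[0], p[0] to p[1], p[1] to p[2] and so on, until p[n-1] goes back to 0
--     # For this to work, p needs to be a permutation of 1..n-1.
--     #
--     # For example, size = 3 we have p=(1,2) for the circle 0->1->2->0 and p=(2,1) for the circle 0->2->1->0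
--     trivial = tuple(range(1, size))   # (1,2,...size-1)
--     for necklace in itertools.permutations(trivial):
--         # The actual necklace is [0]+necklace
--         cycle_perm = [0] * size
--         cur = 0
--         for element in necklace:
--             cycle_perm[cur] = element
--             cur = element
--         cycle_perm[necklace[-1]] = 0  # Add the [0] that is missing from the necklace
--         yield cycle_perm
--
-- _circle_cache = {}  # perm_size->all circles of size
--
-- _CACHE_LIMIT = 10
--
-- def _all_circle_permutations(size):
--     if size > _CACHE_LIMIT:
--         return _calc_all_circle_permutations(size)
--
--     if not size in _circle_cache:
--         entries = list(_calc_all_circle_permutations(size))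
--         _circle_cache[size] = entries
--     result = _circle_cache[size]
--     return result
--
-- def _all_perms_from_cycle_struct(perm_size, cycle_struct):
--     """
--     Generates all permutations with a specific cycle structure
--     :param perm_size: Permutation size
--     :param cycle_struct: Cycle structure (list of cycles, each cycle is itself a list of its indices)
--     :return: Generator that generates all the permutations
--     """
--     trivial = list(range(perm_size))
--
--     def generate(perm, cycle_index):
--         # Goes over all the circles of the first cycle, apply each circle and
--         # recursively generates the circles of the rest of the cycles
--         # perm is built gradually, each recursive call applies one cycle
--         if cycle_index < 0:
--             yield tuple(perm)
--             return
--
--         cycle = cycle_struct[cycle_index]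
--         if len(cycle) == 1:
--             yield from generate(perm, cycle_index-1)
--         else:
--             # Example:
--             # Lets say the permutation is (0, 1 ,2 ,3), and the cycle is (0, 1, 3)
--             start_perm = perm[:]
--             circles = _all_circle_permutations(len(cycle))
--             for circle_perm in circles:
--                 # _all_circle_permtuations yields (1, 2, 0) and (2, 0 ,1)
--                 # The permutations we need to return are (1, 3, 2, 0) and (3, 0, 2, 1) - these have
--                 # one stationary point - 2, and a cycle of length 3.
--                 # To do this, we need to convert the cycle from (1,2,0) and (2,0,1) to (1,3,0) and (3,0,1)
--                 converted_circle = [cycle[i] for i in circle_perm]  # Converted circle is now (1,3,0) or (3,0,1)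
--                 for i in range(len(converted_circle)):
--                     perm[cycle[i]] = converted_circle[i]  # Perm is now (1, 3, 2, 0) or (3, 0, 2, 1) <--- The converted_circle applied to (0, 1, 3)
--                 yield from generate(perm, cycle_index-1)    # Apply the rest of the circles
--                 perm = start_perm[:]
--
--     yield from generate(trivial[:], len(cycle_struct)-1)
-- ===== SOURCE B (Python) =====
-- import itertools
--
-- def _calc_all_circle_permutations(size):
--     trivial = tuple(range(1, size))
--     for necklace in itertools.permutations(trivial):
--         cycle_perm = [0] * size
--         cur = 0
--         for element in necklace:
--             cycle_perm[cur] = element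
--             cur = element
--         cycle_perm[necklace[-1]] = 0
--         yield cycle_perm
--
-- def _all_perms_from_cycle_struct(perm_size, cycle_struct):
--     # Iterative assembly: precompute each cycle's possible assignments once,
--     # then take the cartesian product (cycles ordered last-to-first so the
--     # first cycle varies fastest) and apply each combination to the identity.
--     options = []
--     for cycle in reversed(cycle_struct):
--         if len(cycle) == 1:
--             options.append([None])
--         else:
--             options.append([(cycle, [cycle[i] for i in circle])
--                             for circle in _calc_all_circle_permutations(len(cycle))])
--     for combo in itertools.product(*options):
--         perm = list(range(perm_size))
--         for assignment in combo:
--             if assignment is not None: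
--                 cycle, converted = assignment
--                 for i in range(len(converted)):
--                     perm[cycle[i]] = converted[i]
--         yield tuple(perm)
-- ===== Notes on version B (the rewrite author's own statement) =====
-- stated objective: alternative
-- what changed: The recursive generator over cycle indices is replaced by an iterative assembly: per-cycle assignment options are precomputed once and an itertools.product over them (cycles last-to-first, so the first cycle varies fastest) is applied to the identity permutation.
import Mathlib
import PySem

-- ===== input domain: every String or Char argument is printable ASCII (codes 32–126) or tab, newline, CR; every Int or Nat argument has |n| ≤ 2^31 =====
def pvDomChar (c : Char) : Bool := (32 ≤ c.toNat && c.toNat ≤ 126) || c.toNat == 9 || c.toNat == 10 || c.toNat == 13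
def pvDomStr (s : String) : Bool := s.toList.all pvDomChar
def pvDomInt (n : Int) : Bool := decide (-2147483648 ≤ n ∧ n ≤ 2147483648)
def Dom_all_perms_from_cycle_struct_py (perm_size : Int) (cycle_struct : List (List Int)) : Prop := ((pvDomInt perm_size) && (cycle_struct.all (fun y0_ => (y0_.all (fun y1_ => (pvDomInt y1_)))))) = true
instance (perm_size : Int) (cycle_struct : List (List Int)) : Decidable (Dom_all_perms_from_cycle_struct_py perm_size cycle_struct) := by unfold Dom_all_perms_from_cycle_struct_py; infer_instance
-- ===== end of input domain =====

-- ===== PORT A =====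
-- B changes the decomposition only: A's recursive generator becomes an iterative
-- cartesian product over precomputed per-cycle assignments (objective: alternative).
-- Both Pythons are generators; the ports return the list of all yielded tuples.

-- shared module helper _calc_all_circle_permutations / _all_circle_permutations
-- (the cache in _all_circle_permutations does not change the yielded values).
-- necklace[-1] is ported as pyGetD necklace (-1) 0: exact, since the helper is only
-- reached (under Pre_) with size ≥ 2, where every necklace is nonempty.
def buildCyclePerm (size : Nat) (necklace : List Int) : List Int :=
  let st := necklace.foldl
    (fun (s : List Int × Int) e => (PySem.List.pySetD s.1 s.2 e, e))
    (List.replicate size (0 : Int), 0)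
  PySem.List.pySetD st.1 (PySem.List.pyGetD necklace (-1) 0) 0

def circlePerms (size : Nat) : List (List Int) :=
  let trivial := PySem.List.pyRange 1 (size : Int) 1
  (PySem.List.permutations trivial trivial.length).map (buildCyclePerm size)

-- the inner assignment loop both Pythons share:
-- for i in range(len(converted)): perm[cycle[i]] = converted[i]
def applyConverted (perm cycle conv : List Int) : List Int :=
  (PySem.List.pyRange 0 (conv.length : Int) 1).foldl
    (fun p i => PySem.List.pySetD p (PySem.List.pyGetD cycle i 0) (PySem.List.pyGetD conv i 0)) perm

-- A's recursive generate(perm, cycle_index); fuel n stands for cycle_index = n - 1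
def genA (cs : List (List Int)) : List Int → Nat → List (List Int)
  | perm, 0 => [perm]
  | perm, n + 1 =>
    let cycle := cs.getD n []
    if cycle.length == 1 then genA cs perm n
    else (circlePerms cycle.length).flatMap (fun circle_perm =>
      genA cs (applyConverted perm cycle (circle_perm.map (fun j => PySem.List.pyGetD cycle j 0))) n)

def all_perms_from_cycle_struct_py (perm_size : Int) (cycle_struct : List (List Int)) : List (List Int) :=
  genA cycle_struct (PySem.List.pyRange 0 perm_size 1) cycle_struct.length

-- ===== PORT B =====
def cycleOptions (cycle : List Int) : List (Option (List Int × List Int)) :=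
  if cycle.length == 1 then [none]
  else (circlePerms cycle.length).map
    (fun circle => some (cycle, circle.map (fun j => PySem.List.pyGetD cycle j 0)))

-- itertools.product over a list of option lists (rightmost factor varies fastest)
def prodAll {α : Type} : List (List α) → List (List α)
  | [] => [[]]
  | l :: ls => l.flatMap (fun x => (prodAll ls).map (fun c => x :: c))

def applyOpt (p : List Int) (o : Option (List Int × List Int)) : List Int :=
  match o with
  | none => p
  | some (c, conv) => applyConverted p c conv

def all_perms_from_cycle_struct_py_alt (perm_size : Int) (cycle_struct : List (List Int)) : List (List Int) :=
  let options := cycle_struct.reverse.map cycleOptions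
  (prodAll options).map (fun combo => combo.foldl applyOpt (PySem.List.pyRange 0 perm_size 1))

-- ===== PRECONDITION & SPEC =====
-- Pre_ excludes exactly the inputs on which A raises IndexError: an empty cycle
-- (its size-0 circle computation indexes an empty necklace), or a cycle of length
-- ≥ 2 containing an index outside the valid Python range [-perm_size, perm_size).
def Pre_all_perms_from_cycle_struct_py (perm_size : Int) (cycle_struct : List (List Int)) : Prop :=
  ∀ c ∈ cycle_struct, c ≠ [] ∧ (c.length = 1 ∨ ∀ i ∈ c, -perm_size ≤ i ∧ i < perm_size)
instance (perm_size : Int) (cycle_struct : List (List Int)) : Decidable (Pre_all_perms_from_cycle_struct_py perm_size cycle_struct) := by unfold Pre_all_perms_from_cycle_struct_py; infer_instance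

def pvWitness_all_perms_from_cycle_struct_py : Int × List (List Int) := (4, [[0, 1, 3], [2]])

def Spec_all_perms_from_cycle_struct_py (perm_size : Int) (cycle_struct : List (List Int)) (out : List (List Int)) : Prop := out = all_perms_from_cycle_struct_py_alt perm_size cycle_struct
instance (perm_size : Int) (cycle_struct : List (List Int)) (out : List (List Int)) : Decidable (Spec_all_perms_from_cycle_struct_py perm_size cycle_struct out) := by unfold Spec_all_perms_from_cycle_struct_py; infer_instance

-- ===== CLAIM (what is proved, stated in full; the proofs are below) =====
def Claim_equal_all_perms_from_cycle_struct_py : Prop := ∀ (perm_size : Int) (cycle_struct : List (List Int)), Dom_all_perms_from_cycle_struct_py perm_size cycle_struct → Pre_all_perms_from_cycle_struct_py perm_size cycle_struct → Spec_all_perms_from_cycle_struct_py perm_size cycle_struct (all_perms_from_cycle_struct_py perm_size cycle_struct)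

-- ===== LEMMAS AND PROOFS =====
-- Common shape of both computations: process the reversed cycle list front-to-back.
def genG : List (List Int) → List Int → List (List Int)
  | [], perm => [perm]
  | c :: rest, perm =>
    if c.length == 1 then genG rest perm
    else (circlePerms c.length).flatMap (fun circle_perm =>
      genG rest (applyConverted perm c (circle_perm.map (fun j => PySem.List.pyGetD c j 0))))

theorem genA_eq_genG (cs : List (List Int)) :
    ∀ n, n ≤ cs.length → ∀ perm, genA cs perm n = genG ((cs.take n).reverse) perm := by
  intro n
  induction n with
  | zero => intro _ perm; simp [genA, genG]
  | succ n ih =>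
    intro hn perm
    have hlt : n < cs.length := by omega
    have htake : (cs.take (n + 1)).reverse = cs[n] :: (cs.take n).reverse := by
      rw [List.take_add_one, List.getElem?_eq_getElem hlt]; simp
    rw [htake]
    simp only [genA, genG, List.getD_eq_getElem cs [] hlt, ih (by omega)]

theorem prodAll_eq_genG :
    ∀ (l : List (List Int)) (perm : List Int),
      (prodAll (l.map cycleOptions)).map (fun combo => combo.foldl applyOpt perm) = genG l perm := by
  intro l
  induction l with
  | nil => intro perm; simp [prodAll, genG]
  | cons c rest ih =>
    intro perm
    by_cases h1 : c.length == 1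
    · simp [prodAll, genG, h1, cycleOptions, applyOpt, Function.comp_def, ih]
    · simp [prodAll, genG, h1, cycleOptions, applyOpt, List.map_flatMap,
        List.flatMap_map, Function.comp_def, ih]

theorem ports_agree (perm_size : Int) (cycle_struct : List (List Int)) :
    all_perms_from_cycle_struct_py perm_size cycle_struct
      = all_perms_from_cycle_struct_py_alt perm_size cycle_struct := by
  unfold all_perms_from_cycle_struct_py all_perms_from_cycle_struct_py_alt
  rw [genA_eq_genG cycle_struct cycle_struct.length le_rfl, List.take_length,
    prodAll_eq_genG cycle_struct.reverse]

-- ===== VERDICT (by name: the statement is the Claim_ definition above) =====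
theorem all_perms_from_cycle_struct_py_spec : Claim_equal_all_perms_from_cycle_struct_py := by
  intro perm_size cycle_struct _ _
  unfold Spec_all_perms_from_cycle_struct_py
  exact ports_agree perm_size cycle_struct
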